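-- pv_equiv track=rewrite | github.com/rvstrizh/best_price | settings.py | filter_product
-- ===== SOURCE A (Python) =====
-- brands_pl = ['apple', 'huawei', 'realme', 'samsung', 'xiaomi', 'honor']
--
-- brands_kof = ['deLonghi', 'philips', 'smeg', 'polaris', 'nivona', 'jura', 'bosh']
--
-- brands_watch = ['apple', 'huawei', 'samsung']
--
-- def filter_product(name, category):
--     flag = False
--     if category == 'planshety' and any(brand in name.lower() for brand in brands_pl):
--         flag = True
--     elif category == 'kofemashiny' and any(brand in name.lower() for brand in brands_kof):
--         flag = True
--     elif category == 'umnye-chasy' and any(brand in name.lower() for brand in brands_watch):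
--         flag = True
--     return flag
-- ===== SOURCE B (Python) =====
-- brands_pl = ['apple', 'huawei', 'realme', 'samsung', 'xiaomi', 'honor']
-- brands_kof = ['deLonghi', 'philips', 'smeg', 'polaris', 'nivona', 'jura', 'bosh']
-- brands_watch = ['apple', 'huawei', 'samsung']
--
-- CATEGORY_BRANDS = {
--     'planshety': brands_pl,
--     'kofemashiny': brands_kof,
--     'umnye-chasy': brands_watch,
-- }
--
-- def filter_product(name, category):
--     # Single left-to-right scan over start positions of the lowered name:
--     # at each position, check whether some brand of the category starts there.
--     brands = CATEGORY_BRANDS.get(category, [])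
--     s = name.lower()
--     for i in range(len(s) + 1):
--         for brand in brands:
--             if s.startswith(brand, i):
--                 return True
--     return False
-- ===== Notes on version B (the rewrite author's own statement) =====
-- stated objective: alternative
-- what changed: B replaces the if/elif chain of per-brand built-in substring tests ('brand in name.lower()') with a table lookup of the category's brand list followed by one explicit scan over start positions of the lowered name, testing at each position whether some brand starts there (startswith with offset); the substring search is thus done by position, not per brand.
import Mathlib
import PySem

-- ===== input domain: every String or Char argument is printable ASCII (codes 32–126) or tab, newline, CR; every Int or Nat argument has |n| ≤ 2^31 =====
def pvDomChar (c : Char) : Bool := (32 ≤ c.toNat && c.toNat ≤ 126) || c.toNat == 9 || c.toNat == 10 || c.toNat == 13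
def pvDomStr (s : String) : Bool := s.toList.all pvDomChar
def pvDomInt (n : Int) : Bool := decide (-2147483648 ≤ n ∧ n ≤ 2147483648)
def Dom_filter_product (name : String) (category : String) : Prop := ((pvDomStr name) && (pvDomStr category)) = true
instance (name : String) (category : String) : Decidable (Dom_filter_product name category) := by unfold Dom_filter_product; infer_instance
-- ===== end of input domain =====

-- B replaces the if/elif chain of per-brand built-in substring tests with a category→brands table
-- and one explicit scan over start positions of the lowered name (alternative decomposition, same cost).

-- ===== PORT A =====
def brands_pl : List String := ["apple", "huawei", "realme", "samsung", "xiaomi", "honor"]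
def brands_kof : List String := ["deLonghi", "philips", "smeg", "polaris", "nivona", "jura", "bosh"]
def brands_watch : List String := ["apple", "huawei", "samsung"]

def filter_product (name : String) (category : String) : Bool :=
  let flag := false
  if category == "planshety" && brands_pl.any (fun brand => PySem.Str.isIn brand (PySem.Str.lower name)) then
    true
  else if category == "kofemashiny" && brands_kof.any (fun brand => PySem.Str.isIn brand (PySem.Str.lower name)) then
    true
  else if category == "umnye-chasy" && brands_watch.any (fun brand => PySem.Str.isIn brand (PySem.Str.lower name)) then
    true
  else
    flag

-- ===== PORT B =====
def CATEGORY_BRANDS : PySem.Dict String (List String) :=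
  PySem.Dict.ofList [("planshety", brands_pl), ("kofemashiny", brands_kof), ("umnye-chasy", brands_watch)]

-- s.startswith(brand, i) for 0 ≤ i ≤ len(s) is exactly 'brand.toList is a prefix of s.toList.drop i'
def filter_product_alt (name : String) (category : String) : Bool :=
  let brands := PySem.Dict.getD CATEGORY_BRANDS category []
  let s := PySem.Str.lower name
  (List.range (s.toList.length + 1)).any fun i =>
    brands.any fun brand => PySem.Chars.startswith (s.toList.drop i) brand.toList

-- ===== PRECONDITION & SPEC =====
def Spec_filter_product (name : String) (category : String) (out : Bool) : Prop := out = filter_product_alt name category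
instance (name : String) (category : String) (out : Bool) : Decidable (Spec_filter_product name category out) := by unfold Spec_filter_product; infer_instance

-- ===== CLAIM =====
def Claim_equal_filter_product : Prop := ∀ (name : String) (category : String), Dom_filter_product name category → Spec_filter_product name category (filter_product name category)

-- ===== LEMMAS AND PROOFS =====

-- the positional scan finds a brand iff some brand is a substring
lemma scan_eq_any_isIn (L : List Char) (bs : List String) :
    ((List.range (L.length + 1)).any fun i =>
        bs.any fun brand => PySem.Chars.startswith (L.drop i) brand.toList)
      = bs.any fun brand => PySem.Chars.isIn brand.toList L := by
  rw [Bool.eq_iff_iff]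
  simp only [List.any_eq_true, List.mem_range, PySem.Chars.startswith_iff]
  constructor
  · rintro ⟨i, _, b, hb, hp⟩
    exact ⟨b, hb, (PySem.Chars.exists_prefix_drop_iff_isIn b.toList L).mp ⟨i, hp⟩⟩
  · rintro ⟨b, hb, h⟩
    obtain ⟨j, hp⟩ := (PySem.Chars.exists_prefix_drop_iff_isIn b.toList L).mpr h
    by_cases hj : j ≤ L.length
    · exact ⟨j, by omega, b, hb, hp⟩
    · refine ⟨L.length, by omega, b, hb, ?_⟩
      rw [List.drop_length]
      rwa [List.drop_eq_nil_of_le (by omega)] at hp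

-- ===== VERDICT =====
theorem filter_product_spec : Claim_equal_filter_product := by
  intro name category _
  unfold Spec_filter_product filter_product filter_product_alt CATEGORY_BRANDS
  by_cases h1 : category = "planshety"
  · subst h1
    simp [PySem.Dict.getD, PySem.Dict.ofList, PySem.Dict.get?, PySem.Dict.update,
      PySem.Dict.empty, PySem.Dict.insert]
    rw [scan_eq_any_isIn]; simp [List.any_eq]
  · by_cases h2 : category = "kofemashiny"
    · subst h2
      simp [PySem.Dict.getD, PySem.Dict.ofList, PySem.Dict.get?, PySem.Dict.update,
        PySem.Dict.empty, PySem.Dict.insert]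
      rw [scan_eq_any_isIn]; simp [List.any_eq]
    · by_cases h3 : category = "umnye-chasy"
      · subst h3
        simp [PySem.Dict.getD, PySem.Dict.ofList, PySem.Dict.get?, PySem.Dict.update,
          PySem.Dict.empty, PySem.Dict.insert]
        rw [scan_eq_any_isIn]; simp [List.any_eq]
      · have h1' : ("planshety" == category) = false := by
          simp only [beq_eq_false_iff_ne]; exact fun h => h1 h.symm
        have h2' : ("kofemashiny" == category) = false := by
          simp only [beq_eq_false_iff_ne]; exact fun h => h2 h.symm
        have h3' : ("umnye-chasy" == category) = false := by
          simp only [beq_eq_false_iff_ne]; exact fun h => h3 h.symm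
        simp [PySem.Dict.getD, PySem.Dict.ofList, PySem.Dict.get?, PySem.Dict.update,
          PySem.Dict.empty, PySem.Dict.insert, h1, h2, h3, h1', h2', h3']
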